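-- pv_equiv track=rewrite | github.com/yojun313/knpu | MANAGER/Manager_Analysis.py | cal_df
-- ===== SOURCE A (Python) =====
-- def cal_df(keyword_list, year_divided_dic):
--     df_counts = {}
--     for year in year_divided_dic:
--         keyword_counts = {}
--         for keyword in keyword_list:  # keyword는 keyword_list의 keyword
--             count = 0
--             for doc in year_divided_dic[year]:
--                 if keyword in doc:
--                     count += 1
--             keyword_counts[keyword] = count
--
--         keyword_counts = dict(sorted(keyword_counts.items(), key=lambda x: x[1], reverse=True))
--
--         df_counts[year] = keyword_counts
--     return df_counts
-- ===== SOURCE B (Python) =====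
-- def cal_df(keyword_list, year_divided_dic):
--     # Bucket (counting) sort: a keyword's document frequency is at most the
--     # number of documents in the year, so instead of a comparison sort we drop
--     # each (keyword, count) pair into buckets[count] (in keyword_list order,
--     # which preserves the stable tie-break) and read the buckets out from the
--     # highest count down.
--     df_counts = {}
--     for year, docs in year_divided_dic.items():
--         buckets = [[] for _ in range(len(docs) + 1)]
--         for kw in keyword_list:
--             c = sum(1 for doc in docs if kw in doc)
--             buckets[c].append((kw, c))
--         df_counts[year] = dict(pair for bucket in reversed(buckets) for pair in bucket)
--     return df_counts
-- ===== Notes on version B (the rewrite author's own statement) =====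
-- stated objective: alternative
-- what changed: B replaces A's comparison sort of the per-year counts (dict(sorted(..., key=count, reverse=True))) by a bucket/counting sort: counts are bounded by the number of documents, so each (keyword, count) pair is dropped into buckets[count] in keyword_list order and the buckets are concatenated from the highest count down, which reproduces the stable descending order without sorting; the year's documents are also taken from the .items() iteration instead of re-looking the year up in the dict.
import Mathlib
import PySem

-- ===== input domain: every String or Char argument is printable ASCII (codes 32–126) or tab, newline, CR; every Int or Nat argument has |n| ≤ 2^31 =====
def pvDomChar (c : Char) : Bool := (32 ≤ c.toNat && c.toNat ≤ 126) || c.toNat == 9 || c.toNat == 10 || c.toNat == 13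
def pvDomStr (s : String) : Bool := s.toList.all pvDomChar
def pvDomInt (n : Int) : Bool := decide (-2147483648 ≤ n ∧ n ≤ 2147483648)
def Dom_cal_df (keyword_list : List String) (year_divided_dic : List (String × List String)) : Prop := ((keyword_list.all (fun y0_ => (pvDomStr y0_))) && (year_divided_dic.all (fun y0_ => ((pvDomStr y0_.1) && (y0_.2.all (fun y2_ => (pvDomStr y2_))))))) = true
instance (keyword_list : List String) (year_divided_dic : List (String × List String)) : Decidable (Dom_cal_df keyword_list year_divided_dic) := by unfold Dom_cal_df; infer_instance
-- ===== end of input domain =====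

-- B replaces A's comparison sort of the per-year counts by a bucket (counting) sort:
-- counts are bounded by the number of documents, so (keyword, count) pairs are dropped
-- into buckets[count] in keyword_list order and read out from the highest count down,
-- which reproduces the stable descending order without sorting.

-- ===== PORT A =====
def cal_df (keyword_list : List String) (year_divided_dic : List (String × List String)) : List (String × List (String × Int)) :=
  (year_divided_dic.foldl (fun df p =>
      -- for year in year_divided_dic: year = p.1; year_divided_dic[year] = first-match lookup
      let docs := ((year_divided_dic.find? (fun q => q.1 == p.1)).map (·.2)).getD []
      let kc : PySem.Dict String Int := keyword_list.foldl (fun kc kw =>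
          kc.insert kw (docs.foldl (fun c doc => if PySem.Str.isIn kw doc then c + 1 else c) (0 : Int)))
        PySem.Dict.empty
      df.insert p.1 (PySem.List.sorted kc.items (fun x => x.2) true))
    (PySem.Dict.empty : PySem.Dict String (List (String × Int)))).items

-- ===== PORT B =====
def cal_df_alt (keyword_list : List String) (year_divided_dic : List (String × List String)) : List (String × List (String × Int)) :=
  (year_divided_dic.foldl (fun df p =>
      -- for year, docs in year_divided_dic.items()
      let docs := p.2
      -- buckets = [[] for _ in range(len(docs) + 1)]; c = sum(1 for doc in docs if kw in doc)
      -- (the count is a nonnegative int and is used as a list index, so it is a Nat here;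
      --  buckets[c] is always in range since c <= len(docs), so getD is exact)
      let buckets : List (List (String × Int)) :=
        keyword_list.foldl (fun bs kw =>
            let c : Nat := docs.foldl (fun s doc => if PySem.Str.isIn kw doc then s + 1 else s) 0
            bs.set c (bs.getD c [] ++ [(kw, (c : Int))]))
          (List.replicate (docs.length + 1) [])
      -- dict(pair for bucket in reversed(buckets) for pair in bucket)
      df.insert p.1 (((buckets.reverse.flatMap id).foldl
          (fun d q => d.insert q.1 q.2) (PySem.Dict.empty : PySem.Dict String Int)).items))
    (PySem.Dict.empty : PySem.Dict String (List (String × Int)))).items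

-- ===== PRECONDITION & SPEC =====
-- Pre_ excludes association lists with duplicate year keys: such a list does not represent any
-- Python dict (the value of year_divided_dic is a dict, whose keys are unique), so A's behaviour
-- on it is not defined by the Python source.
def Pre_cal_df (keyword_list : List String) (year_divided_dic : List (String × List String)) : Prop :=
  (year_divided_dic.map Prod.fst).Nodup
instance (keyword_list : List String) (year_divided_dic : List (String × List String)) : Decidable (Pre_cal_df keyword_list year_divided_dic) := by unfold Pre_cal_df; infer_instance

def pvWitness_cal_df : List String × (List (String × List String)) :=
  (["ab", "c"], [("2020", ["xaby", "c d"]), ("2021", ["zz"])])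

def Spec_cal_df (keyword_list : List String) (year_divided_dic : List (String × List String)) (out : List (String × List (String × Int))) : Prop := out = cal_df_alt keyword_list year_divided_dic
instance (keyword_list : List String) (year_divided_dic : List (String × List String)) (out : List (String × List (String × Int))) : Decidable (Spec_cal_df keyword_list year_divided_dic out) := by unfold Spec_cal_df; infer_instance

-- ===== CLAIM (what is proved, stated in full; the proofs are below) =====
def Claim_equal_cal_df : Prop := ∀ (keyword_list : List String) (year_divided_dic : List (String × List String)), Dom_cal_df keyword_list year_divided_dic → Pre_cal_df keyword_list year_divided_dic → Spec_cal_df keyword_list year_divided_dic (cal_df keyword_list year_divided_dic)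

-- ===== LEMMAS AND PROOFS =====

-- document frequency of keyword kw in docs (proof-side abbreviation)
def pvCnt (docs : List String) (kw : String) : Nat := docs.countP (fun doc => PySem.Str.isIn kw doc)

-- first-match lookup of a key of a pair in a fst-Nodup association list returns that pair
theorem pv_find_self (l : List (String × List String)) (p : String × List String)
    (hnd : (l.map Prod.fst).Nodup) (hp : p ∈ l) :
    l.find? (fun q => q.1 == p.1) = some p := by
  induction l with
  | nil => cases hp
  | cons a l ih =>
    simp only [List.map_cons, List.nodup_cons] at hnd
    rcases List.mem_cons.1 hp with rfl | hp'
    · simp [List.find?]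
    · have hne : a.1 ≠ p.1 := by
        intro h; exact hnd.1 (h ▸ List.mem_map_of_mem hp')
      rw [List.find?_cons_of_neg (by simpa using hne)]
      exact ih hnd.2 hp'

-- the Nat counting fold is countP
theorem pv_countP_nat (p : String → Bool) (l : List String) (s : Nat) :
    l.foldl (fun s d => if p d then s + 1 else s) s = s + l.countP p := by
  induction l generalizing s with
  | nil => simp
  | cons d l ih => by_cases h : p d <;> simp [h, ih, List.countP_cons] <;> omega

-- a fold of inserts at keys not containing k leaves getD k unchanged
theorem pv_getD_foldl_insert_not_mem (kws : List String) (v : String → Int)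
    (d : PySem.Dict String Int) (k : String) (hk : k ∉ kws) :
    (kws.foldl (fun d kw => d.insert kw (v kw)) d).getD k 0 = d.getD k 0 := by
  induction kws generalizing d with
  | nil => rfl
  | cons kw kws ih =>
    simp only [List.mem_cons, not_or] at hk
    rw [List.foldl_cons, ih _ hk.2, PySem.Dict.getD_insert, if_neg hk.1]

-- A's keyword_counts dict: lookup of a listed keyword is its (input-independent) value
theorem pv_getD_A (kws : List String) (v : String → Int) (d : PySem.Dict String Int)
    (k : String) (hk : k ∈ kws) :
    (kws.foldl (fun d kw => d.insert kw (v kw)) d).getD k 0 = v k := by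
  induction kws generalizing d with
  | nil => cases hk
  | cons kw kws ih =>
    rw [List.foldl_cons]
    by_cases h : k ∈ kws
    · exact ih _ h
    · rcases List.mem_cons.1 hk with rfl | h'
      · rw [pv_getD_foldl_insert_not_mem _ _ _ _ h, PySem.Dict.getD_insert_self]
      · exact absurd h' h

-- ---- insertion-sort characterisation: stable reverse sort = descending buckets ----

theorem pv_insertBy_skip {α : Type} (b : α → α → Bool) (x : α) (A B : List α)
    (h : ∀ y ∈ A, b x y = false) :
    PySem.List.insertBy b x (A ++ B) = A ++ PySem.List.insertBy b x B := by
  induction A with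
  | nil => rfl
  | cons a A ih =>
    have ha : b x a = false := h a (by simp)
    simp [PySem.List.insertBy, ha, ih (fun y hy => h y (by simp [hy]))]

theorem pv_insertBy_front {α : Type} (b : α → α → Bool) (x : α) (B : List α)
    (h : ∀ y ∈ B, b x y = true) :
    PySem.List.insertBy b x B = x :: B := by
  cases B with
  | nil => rfl
  | cons y ys => simp [PySem.List.insertBy, h y (by simp)]

theorem pv_flatMap_congr {α β : Type} (l : List α) (f g : α → List β)
    (h : ∀ a ∈ l, f a = g a) : l.flatMap f = l.flatMap g := by
  induction l with
  | nil => rfl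
  | cons a l ih =>
    simp [List.flatMap_cons, h a (by simp), ih (fun a ha => h a (by simp [ha]))]

theorem pv_insert_buckets (cs : List Int) (L : List (String × Int)) (x : String × Int)
    (hcs : cs.Pairwise (· > ·)) (hx : x.2 ∈ cs) :
    PySem.List.insertBy (fun a b => decide (b.2 < a.2)) x
        (cs.flatMap (fun c => L.filter (fun p => p.2 == c)))
      = cs.flatMap (fun c => (L ++ [x]).filter (fun p => p.2 == c)) := by
  induction cs with
  | nil => cases hx
  | cons c cs ih =>
    rw [List.pairwise_cons] at hcs
    have hrest : ∀ y ∈ cs.flatMap (fun c => L.filter (fun p => p.2 == c)), y.2 ∈ cs := by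
      intro y hy
      rcases List.mem_flatMap.1 hy with ⟨c', hc', hy'⟩
      have := (List.mem_filter.1 hy').2
      simpa [beq_iff_eq.1 this] using hc'
    have hblock : ∀ y ∈ L.filter (fun p => p.2 == c), y.2 = c := by
      intro y hy; exact beq_iff_eq.1 (List.mem_filter.1 hy).2
    by_cases hxc : x.2 = c
    · have h1 : ∀ y ∈ L.filter (fun p => p.2 == c), decide (y.2 < x.2) = false := by
        intro y hy; simp [hblock y hy, hxc]
      have h2 : ∀ y ∈ cs.flatMap (fun c => L.filter (fun p => p.2 == c)),
          decide (y.2 < x.2) = true := by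
        intro y hy
        have := hcs.1 _ (hrest y hy)
        simp only [decide_eq_true_eq]
        omega
      simp only [List.flatMap_cons]
      rw [pv_insertBy_skip _ _ _ _ h1, pv_insertBy_front _ _ _ h2]
      have h3 : (L ++ [x]).filter (fun p => p.2 == c) = L.filter (fun p => p.2 == c) ++ [x] := by
        simp [List.filter_append, hxc]
      have h4 : cs.flatMap (fun c' => (L ++ [x]).filter (fun p => p.2 == c'))
          = cs.flatMap (fun c' => L.filter (fun p => p.2 == c')) := by
        apply pv_flatMap_congr
        intro c' hc'
        have : x.2 ≠ c' := by have := hcs.1 c' hc'; omega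
        simp [List.filter_append, this]
      rw [h3, h4]
      simp
    · have hx' : x.2 ∈ cs := by
        rcases List.mem_cons.1 hx with h | h
        · exact absurd h hxc
        · exact h
      have hgt : c > x.2 := hcs.1 _ hx'
      have h1 : ∀ y ∈ L.filter (fun p => p.2 == c), decide (y.2 < x.2) = false := by
        intro y hy
        have := hblock y hy
        simp only [decide_eq_false_iff_not]
        omega
      simp only [List.flatMap_cons]
      rw [pv_insertBy_skip _ _ _ _ h1, ih hcs.2 hx']
      have h3 : (L ++ [x]).filter (fun p => p.2 == c) = L.filter (fun p => p.2 == c) := by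
        simp [List.filter_append, hxc]
      rw [h3]

theorem pv_sorted_eq_buckets (L : List (String × Int)) (cs : List Int)
    (hcs : cs.Pairwise (· > ·)) (hL : ∀ p ∈ L, p.2 ∈ cs) :
    PySem.List.sorted L (fun p => p.2) true
      = cs.flatMap (fun c => L.filter (fun p => p.2 == c)) := by
  rw [PySem.List.sorted_rev_eq_foldl_insertBy]
  induction L using List.reverseRecOn with
  | nil => simp
  | append_singleton L x ih =>
    rw [List.foldl_append, List.foldl_cons, List.foldl_nil,
      ih (fun p hp => hL p (by simp [hp]))]
    exact pv_insert_buckets cs L x hcs (hL x (by simp))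

-- ---- B's buckets fold builds, per index i, the keywords of frequency i in order ----

theorem pv_set_map_range {α : Type} (m : Nat) (g : Nat → α) (c : Nat) (x : α) (hc : c < m) :
    ((List.range m).map g).set c x = (List.range m).map (fun i => if i = c then x else g i) := by
  apply List.ext_getElem
  · simp
  · intro i h1 h2
    simp only [List.getElem_set, List.getElem_map, List.getElem_range]
    by_cases h : c = i
    · simp [h]
    · rw [if_neg h, if_neg (by omega)]

theorem pv_buckets (docs : List String) (part : List String) :
    part.foldl (fun bs kw =>
        bs.set (docs.foldl (fun s doc => if PySem.Str.isIn kw doc then s + 1 else s) 0)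
          (bs.getD (docs.foldl (fun s doc => if PySem.Str.isIn kw doc then s + 1 else s) 0) [] ++
            [(kw, ((docs.foldl (fun s doc => if PySem.Str.isIn kw doc then s + 1 else s) 0 : Nat) : Int))]))
      (List.replicate (docs.length + 1) [])
    = (List.range (docs.length + 1)).map
        (fun i => (part.filter (fun kw => pvCnt docs kw == i)).map (fun kw => (kw, (i : Int)))) := by
  induction part using List.reverseRecOn with
  | nil =>
    apply List.ext_getElem
    · simp
    · intro i h1 h2; simp
  | append_singleton part kw ih =>
    rw [List.foldl_append, List.foldl_cons, List.foldl_nil, ih]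
    have hcnt : docs.foldl (fun s doc => if PySem.Str.isIn kw doc then s + 1 else s) 0
        = pvCnt docs kw := by
      rw [pv_countP_nat, Nat.zero_add]; rfl
    have hle : pvCnt docs kw < docs.length + 1 :=
      Nat.lt_succ_of_le List.countP_le_length
    rw [hcnt]
    have hgetD : ((List.range (docs.length + 1)).map
        (fun i => (part.filter (fun kw => pvCnt docs kw == i)).map (fun kw => (kw, (i : Int))))).getD
          (pvCnt docs kw) []
        = (part.filter (fun kw' => pvCnt docs kw' == pvCnt docs kw)).map
            (fun kw' => (kw', ((pvCnt docs kw : Nat) : Int))) := by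
      rw [List.getD_eq_getElem?_getD]
      simp [List.getElem?_map, List.getElem?_range, hle]
    rw [hgetD, pv_set_map_range _ _ _ _ hle]
    apply List.map_congr_left
    intro i hi
    by_cases h : i = pvCnt docs kw
    · subst h
      simp [List.filter_append]
    · have h' : (pvCnt docs kw == i) = false := by simp [beq_iff_eq]; omega
      simp [h, List.filter_append, h']

-- ---- the dict built from the bucket pairs ----

theorem pv_getD_pairs (docs : List String) (ps : List (String × Int)) (d : PySem.Dict String Int)
    (k : String) (hv : ∀ q ∈ ps, q.2 = (pvCnt docs q.1 : Int)) :
    (ps.foldl (fun d q => d.insert q.1 q.2) d).getD k 0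
      = if k ∈ ps.map Prod.fst then (pvCnt docs k : Int) else d.getD k 0 := by
  induction ps using List.reverseRecOn generalizing d with
  | nil => simp
  | append_singleton ps q ih =>
    rw [List.foldl_append, List.foldl_cons, List.foldl_nil, PySem.Dict.getD_insert]
    by_cases hk : k = q.1
    · subst hk
      rw [if_pos rfl, hv q (by simp), if_pos (by simp)]
    · rw [if_neg hk, ih d (fun q' hq' => hv q' (by simp [hq']))]
      have : (k ∈ (ps ++ [q]).map Prod.fst) ↔ (k ∈ ps.map Prod.fst) := by
        simp [hk]
      by_cases hm : k ∈ ps.map Prod.fst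
      · rw [if_pos hm, if_pos (this.2 hm)]
      · rw [if_neg hm, if_neg (fun h => hm (this.1 h))]

-- ---- Set.ofList (first-occurrence dedup) commutes with filter and disjoint append ----

theorem pv_foldl_add_filter (p : String → Bool) (xs : List String) (s : List String) :
    (xs.filter p).foldl PySem.Set.add (s.filter p) = (xs.foldl PySem.Set.add s).filter p := by
  induction xs generalizing s with
  | nil => rfl
  | cons x xs ih =>
    by_cases hp : p x
    · have hstep : PySem.Set.add (s.filter p) x = (PySem.Set.add s x).filter p := by
        simp only [PySem.Set.add, PySem.Set.contains]
        by_cases hm : x ∈ s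
        · simp [List.contains_iff_mem, hm, hp]
        · simp [List.contains_iff_mem, hm, hp, List.filter_append]
      rw [List.filter_cons_of_pos hp, List.foldl_cons, List.foldl_cons, hstep, ih]
    · have hstep : (PySem.Set.add s x).filter p = s.filter p := by
        simp only [PySem.Set.add, PySem.Set.contains]
        by_cases hm : x ∈ s
        · simp [List.contains_iff_mem, hm]
        · simp [List.contains_iff_mem, hm, List.filter_append, hp]
      rw [List.filter_cons_of_neg (by simp [hp]), List.foldl_cons, ← hstep, ih]

theorem pv_ofList_filter (p : String → Bool) (xs : List String) :
    PySem.Set.ofList (xs.filter p) = (PySem.Set.ofList xs).filter p := by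
  rw [PySem.Set.ofList_eq_foldl, PySem.Set.ofList_eq_foldl]
  have := pv_foldl_add_filter p xs []
  simpa using this

theorem pv_foldl_add_split (B : List String) (s t : List String)
    (h : ∀ b ∈ B, b ∉ s) :
    B.foldl PySem.Set.add (s ++ t) = s ++ B.foldl PySem.Set.add t := by
  induction B generalizing t with
  | nil => rfl
  | cons b B ih =>
    have hb : b ∉ s := h b (by simp)
    have hstep : PySem.Set.add (s ++ t) b = s ++ PySem.Set.add t b := by
      simp only [PySem.Set.add, PySem.Set.contains]
      by_cases hm : b ∈ t
      · simp [List.contains_iff_mem, hm, hb]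
      · simp [List.contains_iff_mem, hm, hb, List.append_assoc]
    rw [List.foldl_cons, hstep, ih _ (fun b' hb' => h b' (by simp [hb'])), List.foldl_cons]

theorem pv_ofList_append_disjoint (A B : List String) (h : ∀ b ∈ B, b ∉ A) :
    PySem.Set.ofList (A ++ B) = PySem.Set.ofList A ++ PySem.Set.ofList B := by
  rw [PySem.Set.ofList_eq_foldl, List.foldl_append, ← PySem.Set.ofList_eq_foldl]
  have h' : ∀ b ∈ B, b ∉ (PySem.Set.ofList A : List String) := by
    intro b hb hmem
    exact h b hb ((PySem.Set.mem_ofList A b).1 hmem)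
  have := pv_foldl_add_split B (PySem.Set.ofList A) [] h'
  simpa [PySem.Set.ofList_eq_foldl] using this

theorem pv_ofList_flatMap (docs : List String) (kws : List String) (cs : List Nat)
    (hnd : cs.Nodup) :
    PySem.Set.ofList (cs.flatMap (fun i => kws.filter (fun kw => pvCnt docs kw == i)))
      = cs.flatMap (fun i => (PySem.Set.ofList kws).filter (fun kw => pvCnt docs kw == i)) := by
  induction cs with
  | nil => rfl
  | cons c cs ih =>
    simp only [List.nodup_cons] at hnd
    simp only [List.flatMap_cons]
    rw [pv_ofList_append_disjoint]
    · rw [pv_ofList_filter, ih hnd.2]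
    · intro b hb hmem
      rcases List.mem_flatMap.1 hb with ⟨c', hc', hb'⟩
      have h1 := beq_iff_eq.1 (List.mem_filter.1 hb').2
      have h2 := beq_iff_eq.1 (List.mem_filter.1 hmem).2
      have hcc : c = c' := by omega
      exact hnd.1 (hcc ▸ hc')

-- ---- per year: A's sorted counts list equals B's bucket-concatenation dict items ----

theorem pv_year (kws : List String) (docs : List String) :
    PySem.List.sorted
        (kws.foldl (fun kc kw =>
            kc.insert kw (docs.foldl (fun c doc => if PySem.Str.isIn kw doc then c + 1 else c) (0 : Int)))
          PySem.Dict.empty).items (fun x => x.2) true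
      = (((kws.foldl (fun bs kw =>
              bs.set (docs.foldl (fun s doc => if PySem.Str.isIn kw doc then s + 1 else s) 0)
                (bs.getD (docs.foldl (fun s doc => if PySem.Str.isIn kw doc then s + 1 else s) 0) [] ++
                  [(kw, ((docs.foldl (fun s doc => if PySem.Str.isIn kw doc then s + 1 else s) 0 : Nat) : Int))]))
            (List.replicate (docs.length + 1) [])).reverse.flatMap id).foldl
          (fun d q => d.insert q.1 q.2) (PySem.Dict.empty : PySem.Dict String Int)).items := by
  have hrevnd : ((List.range (docs.length + 1)).reverse).Nodup :=
    List.nodup_reverse.2 List.nodup_range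
  -- ---- A side: the counts dict's items, then the sort as descending buckets ----
  have hitems :
      (kws.foldl (fun kc kw =>
          kc.insert kw (docs.foldl (fun c doc => if PySem.Str.isIn kw doc then c + 1 else c) (0 : Int)))
        PySem.Dict.empty).items
      = (PySem.Set.ofList kws).map (fun k => (k, (pvCnt docs k : Int))) := by
    have hkeys : (kws.foldl (fun kc kw =>
          kc.insert kw (docs.foldl (fun c doc => if PySem.Str.isIn kw doc then c + 1 else c) (0 : Int)))
        (PySem.Dict.empty : PySem.Dict String Int)).keys = PySem.Set.ofList kws := by
      rw [PySem.Dict.keys_foldl_insert]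
      rfl
    rw [PySem.Dict.items_eq_map_keys _ (by rw [hkeys]; exact PySem.Set.nodup_ofList kws) 0, hkeys]
    apply List.map_congr_left
    intro k hk
    have hk' : k ∈ kws := (PySem.Set.mem_ofList kws k).1 hk
    rw [pv_getD_A kws
        (fun kw => docs.foldl (fun c doc => if PySem.Str.isIn kw doc then c + 1 else c) (0 : Int))
        PySem.Dict.empty k hk']
    rw [PySem.List.foldl_count_if, Int.zero_add]
    rfl
  have hAflat : ∀ i : Nat,
      ((PySem.Set.ofList kws).map (fun k => (k, (pvCnt docs k : Int)))).filter
          (fun p => p.2 == ((i : Nat) : Int))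
        = ((PySem.Set.ofList kws).filter (fun k => pvCnt docs k == i)).map
            (fun k => (k, (pvCnt docs k : Int))) := by
    intro i
    rw [List.filter_map]
    congr 1
    apply List.filter_congr
    intro k _
    show (((pvCnt docs k : Int)) == ((i : Nat) : Int)) = (pvCnt docs k == i)
    by_cases h : pvCnt docs k = i
    · simp [h]
    · have h2 : (pvCnt docs k : Int) ≠ ((i : Nat) : Int) := by exact_mod_cast h
      simp [h, h2]
  have hA : PySem.List.sorted
        ((PySem.Set.ofList kws).map (fun k => (k, (pvCnt docs k : Int)))) (fun p => p.2) true
      = (((List.range (docs.length + 1)).reverse).flatMap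
          (fun i => (PySem.Set.ofList kws).filter (fun k => pvCnt docs k == i))).map
            (fun k => (k, (pvCnt docs k : Int))) := by
    rw [pv_sorted_eq_buckets _ (((List.range (docs.length + 1)).reverse).map (fun i : Nat => (i : Int)))
        (by
          apply List.Pairwise.map
          · intro a b h
            exact_mod_cast h
          · exact List.pairwise_reverse.2
              (by simpa [gt_iff_lt] using List.pairwise_lt_range (n := docs.length + 1)))
        (by
          intro p hp
          rcases List.mem_map.1 hp with ⟨k, hk, rfl⟩
          apply List.mem_map.2
          refine ⟨pvCnt docs k, ?_, rfl⟩
          simp only [List.mem_reverse, List.mem_range]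
          exact Nat.lt_succ_of_le List.countP_le_length)]
    rw [List.flatMap_map, List.map_flatMap]
    exact pv_flatMap_congr _ _ _ (fun i _ => hAflat i)
  rw [hitems, hA]
  -- ---- B side: buckets, flatten, dict, items ----
  rw [pv_buckets docs kws, ← List.map_reverse, List.flatMap_map]
  simp only [id_eq]
  have hval : ∀ q ∈ ((List.range (docs.length + 1)).reverse).flatMap
      (fun i => (kws.filter (fun kw => pvCnt docs kw == i)).map (fun kw => (kw, (i : Int)))),
      q.2 = (pvCnt docs q.1 : Int) := by
    intro q hq
    rcases List.mem_flatMap.1 hq with ⟨i, _, hq'⟩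
    rcases List.mem_map.1 hq' with ⟨kw, hkw, rfl⟩
    have := beq_iff_eq.1 (List.mem_filter.1 hkw).2
    simp [this]
  have hfst : ((((List.range (docs.length + 1)).reverse).flatMap
        (fun i => (kws.filter (fun kw => pvCnt docs kw == i)).map (fun kw => (kw, (i : Int))))).map
          Prod.fst)
      = ((List.range (docs.length + 1)).reverse).flatMap
          (fun i => kws.filter (fun kw => pvCnt docs kw == i)) := by
    rw [List.map_flatMap]
    apply pv_flatMap_congr
    intro i _
    rw [List.map_map]
    exact List.map_id' _
  have hkeysB : ((((List.range (docs.length + 1)).reverse).flatMap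
        (fun i => (kws.filter (fun kw => pvCnt docs kw == i)).map (fun kw => (kw, (i : Int))))).foldl
        (fun d q => d.insert q.1 q.2) (PySem.Dict.empty : PySem.Dict String Int)).keys
      = PySem.Set.ofList ((((List.range (docs.length + 1)).reverse).flatMap
          (fun i => (kws.filter (fun kw => pvCnt docs kw == i)).map (fun kw => (kw, (i : Int))))).map
            Prod.fst) := by
    rw [PySem.Dict.keys_foldl_insert_key _ Prod.fst (fun d q => q.2)]
    rfl
  rw [PySem.Dict.items_eq_map_keys _
      (by
        apply PySem.Dict.nodup_keys_foldl_insert_key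
        exact List.nodup_nil) 0, hkeysB, hfst, pv_ofList_flatMap docs kws _ hrevnd]
  apply List.map_congr_left
  intro k hk
  rcases List.mem_flatMap.1 hk with ⟨i, hi, hk'⟩
  have hk2 : k ∈ kws.filter (fun kw => pvCnt docs kw == i) := by
    have h := List.mem_filter.1 hk'
    exact List.mem_filter.2 ⟨(PySem.Set.mem_ofList kws k).1 h.1, h.2⟩
  have hkmem : k ∈ ((((List.range (docs.length + 1)).reverse).flatMap
      (fun i => (kws.filter (fun kw => pvCnt docs kw == i)).map (fun kw => (kw, (i : Int))))).map
        Prod.fst) := by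
    rw [hfst]
    exact List.mem_flatMap.2 ⟨i, hi, hk2⟩
  rw [pv_getD_pairs docs _ _ _ hval, if_pos hkmem]

-- ===== VERDICT (by name: the statement is the Claim_ definition above) =====
theorem cal_df_spec : Claim_equal_cal_df := by
  intro kws ydd _ hpre
  unfold Spec_cal_df cal_df cal_df_alt
  congr 1
  apply PySem.List.foldl_congr_mem
  intro acc p hp
  rw [pv_find_self ydd p hpre hp]
  simp only [Option.map_some, Option.getD_some]
  rw [pv_year kws p.2]
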